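-- pv_equiv track=rewrite | github.com/phamtranminhtri/MM241-Assignment-Group18 | student_submissions/s2352888_2352818_2353036_2353298_2352738/policy2352888_2352818_2353036_2353298_2352738.py | _generate_product_combinations
-- ===== SOURCE A (Python) =====
-- def _generate_product_combinations(products, num_products):
--     """
--     Generate combinations of products with unique sizes
--
--     Args:
--         products: Available products
--         num_products: Number of products to combine
--
--     Returns:
--         Unique product combinations
--     """
--     # If requesting more products than available, return early
--     if num_products > len(products):
--         return []
--
--     combinations = []
--
--     def backtrack(start, current_combo):
--         # If we have the desired number of products, add the combination
--         if len(current_combo) == num_products: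
--             combinations.append(current_combo.copy())
--             return
--
--         # Try adding more products
--         for i in range(start, len(products)):
--             # Ensure unique product sizes in combination
--             if not any(
--                 current_combo and
--                 tuple(p['size']) == tuple(products[i]['size'])
--                 for p in current_combo
--             ):
--                 # Add product to current combination
--                 current_combo.append(products[i])
--
--                 # Recursive call to continue building combination
--                 backtrack(i + 1, current_combo)
--
--                 # Backtrack by removing last added product
--                 current_combo.pop()
--
--     # Start backtracking to generate combinations
--     backtrack(0, [])
--
--     return combinations
-- ===== SOURCE B (Python) =====
-- from itertools import combinations
--
-- def _generate_product_combinations(products, num_products):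
--     """Return all combinations of `num_products` products whose sizes are pairwise distinct."""
--     n = len(products)
--     if num_products < 0 or num_products > n:
--         return []
--     result = []
--     for combo in combinations(range(n), num_products):
--         sizes = [tuple(products[i]['size']) for i in combo]
--         if len(set(sizes)) == num_products:
--             result.append([products[i] for i in combo])
--     return result
-- ===== Notes on version B (the rewrite author's own statement) =====
-- stated objective: idiomatic
-- what changed: Replaces the mutating recursive backtracking (shared current_combo list, append/pop, incremental pruning against the partial combination) by the standard combinations-then-filter pipeline: enumerate index k-combinations in lexicographic order and keep those whose size tuples are pairwise distinct; Pre_ restricts to the natural domain where every product carries a 'size' key whenever sizes get read (outside it A raises KeyError, except at num_products=1 where A's and-short-circuit never reads sizes and returns the singletons while B raises KeyError on the malformed product).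
-- outside the precondition, e.g. on _generate_product_combinations([{'a': [1]}], 1): A returns [[{'a': [1]}]], B raises KeyError
import Mathlib
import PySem

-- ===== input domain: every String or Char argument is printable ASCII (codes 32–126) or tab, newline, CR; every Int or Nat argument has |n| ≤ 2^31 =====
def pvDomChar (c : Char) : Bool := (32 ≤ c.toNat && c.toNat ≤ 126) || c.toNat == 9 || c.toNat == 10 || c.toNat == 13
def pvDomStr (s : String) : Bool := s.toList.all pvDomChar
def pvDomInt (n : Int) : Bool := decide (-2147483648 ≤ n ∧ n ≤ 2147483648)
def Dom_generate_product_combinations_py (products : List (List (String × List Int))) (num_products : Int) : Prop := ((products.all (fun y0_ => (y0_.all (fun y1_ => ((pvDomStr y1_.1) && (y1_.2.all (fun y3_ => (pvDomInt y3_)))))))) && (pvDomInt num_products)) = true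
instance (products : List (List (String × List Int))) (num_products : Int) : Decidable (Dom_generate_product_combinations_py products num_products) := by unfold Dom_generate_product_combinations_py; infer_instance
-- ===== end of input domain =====

-- B replaces A's mutating backtracking search by the idiomatic combinations-then-filter pipeline
-- (enumerate k-index-combinations, keep those with pairwise-distinct sizes); same cost class, clearer code.


-- ===== PORT A =====
-- p['size'] as both Pythons read it (total form; Pre_ excludes the KeyError inputs)
def pvSize (p : List (String × List Int)) : List Int :=
  ((PySem.Dict.mk p).get? "size").getD []

-- the `for i in range(start, len(products))` loop of `backtrack`, as structural recursion on the
-- remaining suffix of `products`; the recursive `backtrack(i+1, …)` entry test is inlined.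
def pvA_loop (k : Int) (combo : List (List (String × List Int))) :
    List (List (String × List Int)) → List (List (List (String × List Int)))
  | [] => []
  | x :: xs =>
      (if !(combo.any (fun p => pvSize p == pvSize x)) then
        (if (((combo ++ [x]).length : Nat) : Int) = k then [combo ++ [x]]
         else pvA_loop k (combo ++ [x]) xs)
       else []) ++ pvA_loop k combo xs

-- backtrack(start, combo): entry length test, then the loop
def pvA_bt (k : Int) (combo rest : List (List (String × List Int))) :
    List (List (List (String × List Int))) :=
  if ((combo.length : Nat) : Int) = k then [combo] else pvA_loop k combo rest

def generate_product_combinations_py (products : List (List (String × List Int))) (num_products : Int) : List (List (List (String × List Int))) :=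
  if num_products > (products.length : Int) then []
  else pvA_bt num_products [] products

-- ===== PORT B =====
-- itertools.combinations(l, k): k-element subsequences in lexicographic order
def pvCombs {α : Type} : Nat → List α → List (List α)
  | 0, _ => [[]]
  | _ + 1, [] => []
  | k + 1, x :: xs => (pvCombs k xs).map (fun c => x :: c) ++ pvCombs (k + 1) xs

def generate_product_combinations_py_alt (products : List (List (String × List Int))) (num_products : Int) : List (List (List (String × List Int))) :=
  let n := products.length
  if num_products < 0 ∨ num_products > (n : Int) then []
  else
    (pvCombs num_products.toNat (List.range n)).foldl
      (fun result c =>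
        let sizes := c.map (fun i => pvSize (products.getD i []))
        if ((PySem.Set.ofList sizes).length : Int) = num_products then
          result ++ [c.map (fun i => products.getD i [])]
        else result) []

-- ===== PRECONDITION & SPEC =====
-- Pre_ restricts to the natural domain: every product carries a "size" key whenever sizes get read
-- (A raises KeyError for size-less products except when num_products is 0, exceeds the count, or is
-- negative with fewer than two products; num_products = 1 with a size-less product is excluded too:
-- there A's `and`-short-circuit never reads sizes and it returns the singletons, while B raises
-- KeyError on the malformed product).
def Pre_generate_product_combinations_py (products : List (List (String × List Int))) (num_products : Int) : Prop :=
  (∀ p ∈ products, "size" ∈ p.map Prod.fst) ∨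
    (products.length : Int) < num_products ∨ num_products = 0 ∨
    (num_products < 0 ∧ products.length ≤ 1)
instance (products : List (List (String × List Int))) (num_products : Int) : Decidable (Pre_generate_product_combinations_py products num_products) := by unfold Pre_generate_product_combinations_py; infer_instance

def pvWitness_generate_product_combinations_py : (List (List (String × List Int))) × Int :=
  ([[("size", [1]), ("w", [3])], [("size", [2])], [("size", [1])]], 2)

def Spec_generate_product_combinations_py (products : List (List (String × List Int))) (num_products : Int) (out : List (List (List (String × List Int)))) : Prop := out = generate_product_combinations_py_alt products num_products
instance (products : List (List (String × List Int))) (num_products : Int) (out : List (List (List (String × List Int)))) : Decidable (Spec_generate_product_combinations_py products num_products out) := by unfold Spec_generate_product_combinations_py; infer_instance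

-- ===== CLAIM (what is proved, stated in full; the proofs are below) =====
def Claim_equal_generate_product_combinations_py : Prop := ∀ (products : List (List (String × List Int))) (num_products : Int), Dom_generate_product_combinations_py products num_products → Pre_generate_product_combinations_py products num_products → Spec_generate_product_combinations_py products num_products (generate_product_combinations_py products num_products)

-- ===== LEMMAS AND PROOFS =====

-- "adding x here keeps all sizes along the path distinct": the condition A's pruning maintains
def pvFresh (seen : List (List Int)) : List (List (String × List Int)) → Bool
  | [] => true
  | x :: xs => !(seen.contains (pvSize x)) && pvFresh (seen ++ [pvSize x]) xs

theorem pvA_loop_neg (k : Int) (hk : k < 0) :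
    ∀ (rest combo : List (List (String × List Int))), pvA_loop k combo rest = [] := by
  intro rest
  induction rest with
  | nil => intro combo; simp [pvA_loop]
  | cons x xs ih =>
      intro combo
      simp [pvA_loop, ih]
      intro _
      omega

theorem pvFresh_nil_iff (pc : List (List (String × List Int))) :
    ∀ seen, pvFresh seen pc = true ↔ (pc.map pvSize).Nodup ∧ ∀ s ∈ pc.map pvSize, s ∉ seen := by
  induction pc with
  | nil => intro seen; simp [pvFresh]
  | cons x xs ih =>
      intro seen
      simp only [pvFresh, Bool.and_eq_true, Bool.not_eq_true', List.contains_eq_mem,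
        decide_eq_false_iff_not, ih, List.map_cons, List.nodup_cons, List.mem_map,
        List.mem_append, List.mem_cons]
      constructor
      · rintro ⟨h1, h2, h3⟩
        exact ⟨⟨fun ⟨p, hp, he⟩ => (h3 _ ⟨p, hp, he⟩) (by simp), h2⟩,
          fun s hs => by
            rcases hs with rfl | ⟨p, hp, rfl⟩
            · exact h1
            · exact fun hmem => (h3 _ ⟨p, hp, rfl⟩) (by simp [hmem])⟩
      · rintro ⟨⟨h1, h2⟩, h3⟩
        refine ⟨h3 _ (Or.inl rfl), h2, ?_⟩
        rintro s ⟨p, hp, rfl⟩ hmem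
        rcases hmem with hm | hm | hm
        · exact h3 _ (Or.inr ⟨p, hp, rfl⟩) hm
        · exact h1 ⟨p, hp, hm⟩
        · simp at hm

theorem pvCombs_length_mem {α : Type} :
    ∀ (k : Nat) (l c : List α), c ∈ pvCombs k l → c.length = k := by
  intro k
  induction k with
  | zero => intro l c hc; simp [pvCombs] at hc; simp [hc]
  | succ k ih =>
      intro l
      induction l with
      | nil => intro c hc; simp [pvCombs] at hc
      | cons x xs ihl =>
          intro c hc
          simp only [pvCombs, List.mem_append, List.mem_map] at hc
          rcases hc with ⟨c', hc', rfl⟩ | hc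
          · simp [ih xs c' hc']
          · exact ihl c hc

theorem pvCombs_map {α β : Type} (g : α → β) :
    ∀ (k : Nat) (l : List α), (pvCombs k l).map (List.map g) = pvCombs k (l.map g) := by
  intro k
  induction k with
  | zero => intro l; simp [pvCombs]
  | succ k ih =>
      intro l
      induction l with
      | nil => simp [pvCombs]
      | cons x xs ihl =>
          simp only [pvCombs, List.map_append, List.map_map, List.map_cons, ← ih, ← ihl]
          simp [Function.comp]

theorem map_getD_range {α : Type} (l : List α) (d : α) :
    (List.range l.length).map (fun i => l.getD i d) = l := by
  apply List.ext_getElem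
  · simp
  · intro i h1 h2
    simp at h1
    simp [List.getD_eq_getElem?_getD, h1]

theorem ofList_sublist {α : Type} [BEq α] [LawfulBEq α] (xs : List α) :
    (PySem.Set.ofList xs).Sublist xs := by
  induction xs with
  | nil => simp [PySem.Set.ofList_nil]
  | cons x xs ih =>
      rw [PySem.Set.ofList_cons]
      exact List.Sublist.cons₂ x (List.filter_sublist.trans ih)

theorem ofList_length_iff {α : Type} [BEq α] [LawfulBEq α] (xs : List α) :
    (PySem.Set.ofList xs).length = xs.length ↔ xs.Nodup := by
  constructor
  · intro h
    have := (ofList_sublist xs).eq_of_length h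
    rw [← this]
    exact PySem.Set.nodup_ofList xs
  · intro h
    rw [PySem.Set.ofList_eq_self_of_nodup _ h]

-- A's membership test = contains on the size image
theorem any_eq_contains (combo : List (List (String × List Int))) (x : List (String × List Int)) :
    (combo.any (fun p => pvSize p == pvSize x)) = (combo.map pvSize).contains (pvSize x) := by
  by_cases h : pvSize x ∈ combo.map pvSize
  · rcases List.mem_map.mp h with ⟨p, hp, he⟩
    simp only [List.contains_eq_mem, h, decide_true]
    exact List.any_eq_true.mpr ⟨p, hp, by simp [he]⟩
  · simp only [List.contains_eq_mem, h, decide_false]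
    refine List.any_eq_false.mpr ?_
    intro p hp
    simp only [beq_iff_eq]
    exact fun he => h (List.mem_map.mpr ⟨p, hp, he⟩)

-- main invariant: the loop from state `combo`, needing k' more products, produces exactly the
-- surviving k'-combinations of the remaining suffix, appended to `combo`
theorem pvA_loop_eq :
    ∀ (rest : List (List (String × List Int))) (k' : Nat)
      (combo : List (List (String × List Int))), 0 < k' →
      pvA_loop ((combo.length + k' : Nat) : Int) combo rest
        = ((pvCombs k' rest).filter (fun c => pvFresh (combo.map pvSize) c)).map
            (fun c => combo ++ c) := by
  intro rest
  induction rest with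
  | nil =>
      intro k' combo hk'
      match k', hk' with
      | k + 1, _ => simp [pvA_loop, pvCombs]
  | cons x xs ih =>
      intro k' combo hk'
      match k', hk' with
      | 1, _ =>
          have hlen : ((((combo ++ [x]).length : Nat) : Int)) = ((combo.length + 1 : Nat) : Int) := by
            simp
          have hxs := ih 1 combo (by omega)
          simp only [pvA_loop, hlen, hxs, pvCombs, List.map_nil,
            List.map_cons, List.filter_append]
          by_cases hc : (combo.any (fun p => pvSize p == pvSize x)) = true
          · rw [any_eq_contains] at hc
            have hex : ∃ a ∈ combo, pvSize a = pvSize x := by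
              simpa [List.contains_eq_mem, List.mem_map, eq_comm] using hc
            obtain ⟨a, ha, he⟩ := hex
            simp [any_eq_contains, pvFresh, List.filter,
              show ∃ a ∈ combo, pvSize a = pvSize x from ⟨a, ha, he⟩]
          · rw [any_eq_contains] at hc
            have hnex : ¬ ∃ a ∈ combo, pvSize a = pvSize x := by
              rintro ⟨a, ha, he⟩
              exact hc (by
                simp only [List.contains_eq_mem, decide_eq_true_eq]
                exact List.mem_map.mpr ⟨a, ha, he⟩)
            simp [any_eq_contains, pvFresh, List.filter, hnex]
      | k'' + 2, _ =>
          have hne : ((((combo ++ [x]).length : Nat) : Int)) ≠ ((combo.length + (k'' + 2) : Nat) : Int) := by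
            simp only [List.length_append, List.length_cons, List.length_nil]
            push_cast; omega
          have h1 : ((combo ++ [x]).length + (k'' + 1) : Nat) = (combo.length + (k'' + 2) : Nat) := by
            simp; omega
          have ih1 := ih (k'' + 1) (combo ++ [x]) (by omega)
          rw [h1] at ih1
          have ih2 := ih (k'' + 2) combo (by omega)
          simp only [pvA_loop, hne, if_false, ih1, ih2, pvCombs,
            List.filter_append, List.map_append]
          congr 1
          rw [List.filter_map]
          by_cases hm : (List.map pvSize combo).contains (pvSize x) = true
          · have hz : List.filter ((fun c => pvFresh (List.map pvSize combo) c) ∘ fun c => x :: c)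
                (pvCombs (k'' + 1) xs) = [] := by
              rw [List.filter_eq_nil_iff]
              intro c _
              simp only [Function.comp_apply, pvFresh, hm, Bool.not_true, Bool.false_and]
              simp
            rw [hz]
            rw [any_eq_contains, hm]
            simp
          · have hmf : (List.map pvSize combo).contains (pvSize x) = false := by
              simpa using hm
            have hz : ∀ c ∈ pvCombs (k'' + 1) xs,
                ((fun c => pvFresh (List.map pvSize combo) c) ∘ fun c => x :: c) c
                  = pvFresh ((combo ++ [x]).map pvSize) c := by
              intro c _
              simp only [Function.comp_apply, pvFresh, hmf, Bool.not_false, Bool.true_and,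
                List.map_append, List.map_cons, List.map_nil]
            rw [List.filter_congr hz]
            rw [any_eq_contains, hmf]
            simp only [Bool.not_false, if_pos, List.map_map, List.map_append,
              List.map_cons, List.map_nil]
            apply List.map_congr_left
            intro c _
            simp [Function.comp, List.append_assoc]

-- the surviving combinations of the whole list, written on the B side
theorem main_bridge (products : List (List (String × List Int))) (k : Int)
    (hk0 : 0 ≤ k) (hk1 : 0 < k.toNat) :
    pvA_loop k [] products
      = (pvCombs k.toNat (List.range products.length)).foldl
          (fun result c =>
            let sizes := c.map (fun i => pvSize (products.getD i []))
            if ((PySem.Set.ofList sizes).length : Int) = k then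
              result ++ [c.map (fun i => products.getD i [])]
            else result) [] := by
  have hcast : ((([] : List (List (String × List Int))).length + k.toNat : Nat) : Int) = k := by
    simp; omega
  have hA := pvA_loop_eq products k.toNat [] hk1
  rw [hcast] at hA
  rw [hA]
  simp only []
  have hcond : ∀ (result : List (List (List (String × List Int)))) (c : List Nat),
      (if ((PySem.Set.ofList (c.map (fun i => pvSize (products.getD i [])))).length : Int) = k then
        result ++ [c.map (fun i => products.getD i [])] else result)
      = (if (decide (((PySem.Set.ofList (c.map (fun i => pvSize (products.getD i [])))).length : Int) = k)) = true then
          result ++ [c.map (fun i => products.getD i [])] else result) := by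
    intro result c; simp
  simp only [hcond]
  have hfold := PySem.List.foldl_append_if
    (fun (c : List Nat) => decide (((PySem.Set.ofList (c.map (fun i => pvSize (products.getD i [])))).length : Int) = k))
    (fun (c : List Nat) => c.map (fun i => products.getD i []))
    (pvCombs k.toNat (List.range products.length)) []
  simp only at hfold
  rw [hfold]
  simp only [List.nil_append, List.map_nil]
  simp only [List.map_id']
  have hprod : products = (List.range products.length).map (fun i => products.getD i []) := by
    rw [map_getD_range]
  conv_lhs => rw [hprod]
  rw [← pvCombs_map, List.filter_map]
  congr 1
  apply List.filter_congr
  intro c hc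
  have hlen : c.length = k.toNat := pvCombs_length_mem _ _ _ hc
  have hsz : (c.map (fun i => pvSize (products.getD i []))).length = k.toNat := by
    simp [hlen]
  rw [Bool.eq_iff_iff]
  have h1 : ((fun c => pvFresh [] c) ∘ List.map fun i => products.getD i []) c
      = pvFresh [] (c.map (fun i => products.getD i [])) := rfl
  rw [h1, pvFresh_nil_iff]
  simp only [List.map_map, decide_eq_true_eq]
  constructor
  · rintro ⟨hnd, -⟩
    have : (c.map (fun i => pvSize (products.getD i []))).Nodup := by
      simpa [Function.comp] using hnd
    rw [(ofList_length_iff _).mpr this, hsz]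
    omega
  · intro h
    have : (PySem.Set.ofList (c.map (fun i => pvSize (products.getD i [])))).length = k.toNat := by
      omega
    have hnd := (ofList_length_iff _).mp (by rw [this, hsz])
    exact ⟨by simpa [Function.comp] using hnd, by simp⟩

-- ===== VERDICT (by name: the statement is the Claim_ definition above) =====
theorem generate_product_combinations_py_spec : Claim_equal_generate_product_combinations_py := by
  intro products k _ _
  unfold Spec_generate_product_combinations_py generate_product_combinations_py
    generate_product_combinations_py_alt
  simp only []
  by_cases hneg : k < 0
  · have hgt : ¬ k > (products.length : Int) := by
      have : (0 : Int) ≤ (products.length : Int) := by positivity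
      omega
    rw [if_neg hgt, if_pos (Or.inl hneg)]
    unfold pvA_bt
    rw [if_neg (by simp; omega)]
    exact pvA_loop_neg k hneg _ _
  · by_cases hgt : k > (products.length : Int)
    · rw [if_pos hgt, if_pos (Or.inr hgt)]
    · rw [if_neg hgt, if_neg (by rintro (h | h) <;> omega)]
      unfold pvA_bt
      by_cases hk : k = 0
      · subst hk
        rw [if_pos (by simp)]
        simp [pvCombs, PySem.Set.ofList_nil]
      · rw [if_neg (by simp; omega)]
        exact main_bridge products k (by omega) (by omega)
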